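-- pv_equiv track=rewrite | github.com/Saketh-Reddy-Bejadi/Python | Practice/1550.py | func
-- ===== SOURCE A (Python) =====
-- def func(arr):
--     c=0
--     for i in range(len(arr)):
--         if arr[i]%2!=0:
--             c+=1
--             if c==3:
--                 return True
--         else:
--             c=0
--     return False
-- ===== SOURCE B (Python) =====
-- def func(arr):
--     a = arr
--     while len(a) >= 3:
--         if a[0] % 2 != 0 and a[1] % 2 != 0 and a[2] % 2 != 0:
--             return True
--         a = a[1:]
--     return False
-- ===== Notes on version B (the rewrite author's own statement) =====
-- stated objective: simpler
-- what changed: Replaces the stateful increment/reset counter with a direct scan over overlapping length-3 windows (test three positions at once, drop the head, no accumulator).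
import Mathlib
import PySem

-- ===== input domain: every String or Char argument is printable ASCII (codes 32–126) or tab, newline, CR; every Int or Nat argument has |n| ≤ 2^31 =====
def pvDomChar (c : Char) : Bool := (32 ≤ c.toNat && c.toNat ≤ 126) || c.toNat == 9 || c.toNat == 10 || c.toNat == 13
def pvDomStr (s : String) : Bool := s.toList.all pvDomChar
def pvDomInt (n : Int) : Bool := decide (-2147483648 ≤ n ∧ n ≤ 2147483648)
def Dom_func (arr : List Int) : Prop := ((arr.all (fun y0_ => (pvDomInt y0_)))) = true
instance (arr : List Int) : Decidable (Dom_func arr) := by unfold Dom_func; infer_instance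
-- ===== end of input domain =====

-- B replaces A's running odd-counter with a scan over overlapping length-3 windows; objective: simpler.

-- ===== PORT A =====
-- the for-loop over range(len(arr)) with counter c, transliterated as structural recursion
def funcLoopA : List Int → Int → Bool
  | [], _ => false
  | x :: xs, c =>
    if PySem.Int.mod x 2 ≠ 0 then
      let c' := c + 1
      if c' = 3 then true else funcLoopA xs c'
    else funcLoopA xs 0

def func (arr : List Int) : Bool := funcLoopA arr 0

-- ===== PORT B =====
-- the while len(a) >= 3 loop: test the three leading positions, then a = a[1:]
def funcLoopB : List Int → Bool
  | x :: y :: z :: rest =>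
    if PySem.Int.mod x 2 ≠ 0 ∧ PySem.Int.mod y 2 ≠ 0 ∧ PySem.Int.mod z 2 ≠ 0 then true
    else funcLoopB (y :: z :: rest)
  | _ => false

def func_alt (arr : List Int) : Bool := funcLoopB arr

-- ===== PRECONDITION & SPEC =====
def Spec_func (arr : List Int) (out : Bool) : Prop := out = func_alt arr
instance (arr : List Int) (out : Bool) : Decidable (Spec_func arr out) := by unfold Spec_func; infer_instance

-- ===== CLAIM (what is proved, stated in full; the proofs are below) =====
def Claim_equal_func : Prop := ∀ (arr : List Int), Dom_func arr → Spec_func arr (func arr)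

-- ===== LEMMAS AND PROOFS =====

-- pref xs k: the first k elements of xs exist and are all odd
def pvPref : List Int → Nat → Bool
  | _, 0 => true
  | [], _ + 1 => false
  | x :: xs, k + 1 => decide (PySem.Int.mod x 2 ≠ 0) && pvPref xs k

lemma funcLoopB_cons (x : Int) (xs : List Int) :
    funcLoopB (x :: xs) = (pvPref (x :: xs) 3 || funcLoopB xs) := by
  match xs with
  | [] => simp [funcLoopB, pvPref]
  | [y] => simp [funcLoopB, pvPref]
  | y :: z :: rest =>
    by_cases hx : PySem.Int.mod x 2 ≠ 0 <;>
    by_cases hy : PySem.Int.mod y 2 ≠ 0 <;>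
    by_cases hz : PySem.Int.mod z 2 ≠ 0 <;>
    simp [funcLoopB, pvPref, hx, hy, hz]

lemma pref3_loopB (xs : List Int) :
    (pvPref xs 3 || funcLoopB xs) = funcLoopB xs := by
  match xs with
  | [] => simp [funcLoopB, pvPref]
  | [x] => simp [funcLoopB, pvPref]
  | [x, y] => simp [funcLoopB, pvPref]
  | x :: y :: z :: rest =>
    by_cases hx : PySem.Int.mod x 2 ≠ 0 <;>
    by_cases hy : PySem.Int.mod y 2 ≠ 0 <;>
    by_cases hz : PySem.Int.mod z 2 ≠ 0 <;>
    simp [funcLoopB, pvPref, hx, hy, hz]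

lemma pref_two_one (xs : List Int) (h : pvPref xs 2 = true) : pvPref xs 1 = true := by
  match xs with
  | [] => simp [pvPref] at h
  | x :: xs =>
    simp [pvPref] at h ⊢
    exact h.1

lemma func_key (xs : List Int) :
    ∀ (c : Int) (k : Nat), c + k = 3 → (k = 1 ∨ k = 2 ∨ k = 3) →
      funcLoopA xs c = (pvPref xs k || funcLoopB xs) := by
  induction xs with
  | nil =>
    intro c k hck hk
    rcases hk with h | h | h <;> subst h <;> simp [funcLoopA, funcLoopB, pvPref]
  | cons x xs ih =>
    intro c k hck hk
    have hmx : (PySem.Int.mod x 2 ≠ 0) ↔ x % 2 = 1 := by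
      rw [PySem.Int.mod_eq_emod_of_pos (by omega)]
      omega
    by_cases hx : x % 2 = 1
    · rcases hk with h | h | h
      · -- k = 1, c = 2: the counter reaches 3, and the leading window is all odd
        subst h
        have hc : c = 2 := by omega
        subst hc
        simp [funcLoopA, hmx, hx, pvPref]
      · -- k = 2, c = 1
        subst h
        have hc : c = 1 := by omega
        subst hc
        rw [funcLoopB_cons]
        have h13 : ¬ ((1 : Int) + 1 = 3) := by omega
        simp only [funcLoopA, hmx, hx, pvPref, h13, if_true, if_false, ite_true,
          ite_false, decide_true, Bool.true_and, ne_eq, not_false_eq_true,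
          reduceIte, decide_false]
        rw [show ((1:Int)+1) = 2 by norm_num, ih 2 1 (by omega) (by omega)]
        cases hp : pvPref xs 2
        · simp [hp, pvPref]
        · simp [hp, pvPref, pref_two_one xs hp]
      · -- k = 3, c = 0
        subst h
        have hc : c = 0 := by omega
        subst hc
        rw [funcLoopB_cons]
        have h03 : ¬ ((0 : Int) + 1 = 3) := by omega
        simp only [funcLoopA, hmx, hx, pvPref, h03, if_true, if_false, ite_true,
          ite_false, decide_true, Bool.true_and, ne_eq, not_false_eq_true,
          reduceIte, decide_false]
        rw [show ((0:Int)+1) = 1 by norm_num, ih 1 2 (by omega) (by omega)]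
        cases hp : pvPref xs 2 <;> simp [hp, pvPref]
    · -- even head: the counter resets and every window through x is dead
      have hA : funcLoopA (x :: xs) c = funcLoopA xs 0 := by
        simp [funcLoopA, hx]
      rw [hA, ih 0 3 (by omega) (by omega), funcLoopB_cons]
      rcases hk with h | h | h <;> subst h <;>
        simp [pvPref, hx, pref3_loopB]

-- ===== VERDICT (by name: the statement is the Claim_ definition above) =====
theorem func_spec : Claim_equal_func := by
  intro arr _
  unfold Spec_func func func_alt
  rw [func_key arr 0 3 (by omega) (by omega), pref3_loopB]
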